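-- pv_equiv track=rewrite | github.com/EpitechMirror/Zappy | ai/src/ai.py | parse_look_result
-- ===== SOURCE A (Python) =====
-- from typing import List, Dict, Tuple
--
-- def parse_look_result(result: str) -> List[List[str]]:
--     """Parse the look command result"""
--     content = result.strip("[]")
--     tiles = []
--     current_tile = []
--
--     i = 0
--     while i < len(content):
--         if content[i] == ",":
--             tiles.append(current_tile)
--             current_tile = []
--             i += 1
--             if i < len(content) and content[i] == " ":
--                 i += 1
--         else:
--             end = i
--             while end < len(content) and content[end] != ",":
--                 end += 1
--
--             tile_content = content[i:end].strip()
--             if tile_content: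
--                 current_tile = tile_content.split()
--             else:
--                 current_tile = []
--             i = end
--
--     if current_tile or i == len(content):
--         tiles.append(current_tile)
--
--     return tiles
-- ===== SOURCE B (Python) =====
-- def parse_look_result(result: str):
--     """Parse the look command result"""
--     return [field.strip().split() for field in result.strip("[]").split(",")]
-- ===== Notes on version B (the rewrite author's own statement) =====
-- stated objective: simpler
-- what changed: Replaces the index-based character state machine (manual comma scan, space skipping, end-of-input bookkeeping) with a single comprehension: strip the bracket characters, split on commas, and strip/whitespace-split each field.
import Mathlib
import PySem

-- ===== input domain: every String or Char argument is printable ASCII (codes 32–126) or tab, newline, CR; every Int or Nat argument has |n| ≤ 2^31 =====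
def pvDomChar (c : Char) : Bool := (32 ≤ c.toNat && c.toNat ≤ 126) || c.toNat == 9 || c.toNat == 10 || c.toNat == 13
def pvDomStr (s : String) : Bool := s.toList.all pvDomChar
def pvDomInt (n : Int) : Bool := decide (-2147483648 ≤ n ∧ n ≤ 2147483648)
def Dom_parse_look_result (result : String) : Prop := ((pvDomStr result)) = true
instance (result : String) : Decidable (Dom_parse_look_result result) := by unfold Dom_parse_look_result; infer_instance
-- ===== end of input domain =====

-- B replaces A's char-by-char index state machine with strip-brackets / split-on-comma / strip-split each field (simpler decomposition, same cost).

-- ===== PORT A =====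
-- inner `while end < len(content) and content[end] != ","` scan
def pvFindEnd (content : List Char) (e : Nat) : Nat :=
  if h : e < content.length then
    if content[e] = ',' then e else pvFindEnd content (e + 1)
  else e
termination_by content.length - e

-- needed only for pvLoopA's termination (cited in decreasing_by)
theorem le_pvFindEnd (content : List Char) (e : Nat) : e ≤ pvFindEnd content e := by
  fun_induction pvFindEnd content e
  all_goals omega

theorem pvFindEnd_gt (content : List Char) (i : Nat) (h : i < content.length)
    (hc : ¬ content[i] = ',') : i < pvFindEnd content i := by
  have h1 : pvFindEnd content i = pvFindEnd content (i + 1) := by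
    conv_lhs => rw [pvFindEnd]
    rw [dif_pos h, if_neg hc]
  have := le_pvFindEnd content (i + 1)
  omega

-- the `while i < len(content)` loop with state (i, tiles, current_tile), plus the final append
def pvLoopA (content : List Char) (i : Nat) (tiles : List (List String)) (cur : List String) :
    List (List String) :=
  if h : i < content.length then
    if content[i] = ',' then
      let tiles' := tiles ++ [cur]
      let j := i + 1
      let j' := if h2 : j < content.length then (if content[j] = ' ' then j + 1 else j) else j
      pvLoopA content j' tiles' []
    else
      let e := pvFindEnd content i
      let tc := PySem.Chars.strip (PySem.List.slice content (some (i : Int)) (some (e : Int)))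
      pvLoopA content e tiles (if tc ≠ [] then (PySem.Chars.split₀ tc).map String.mk else [])
  else
    if cur ≠ [] ∨ i = content.length then tiles ++ [cur] else tiles
termination_by content.length - i
decreasing_by
  · split <;> rename_i h2 <;> [skip; omega] <;> split <;> omega
  · have := pvFindEnd_gt content i h (by assumption)
    omega

def parse_look_result (result : String) : List (List String) :=
  pvLoopA (PySem.Chars.stripChars result.toList "[]".toList) 0 [] []

-- ===== PORT B =====
def parse_look_result_alt (result : String) : List (List String) :=
  (PySem.Chars.splitOn (PySem.Chars.stripChars result.toList "[]".toList) [',']).map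
    (fun f => (PySem.Chars.split₀ (PySem.Chars.strip f)).map String.mk)

-- ===== PRECONDITION & SPEC =====
def Spec_parse_look_result (result : String) (out : List (List String)) : Prop := out = parse_look_result_alt result
instance (result : String) (out : List (List String)) : Decidable (Spec_parse_look_result result out) := by unfold Spec_parse_look_result; infer_instance

-- ===== CLAIM (what is proved, stated in full; the proofs are below) =====
def Claim_equal_parse_look_result : Prop := ∀ (result : String), Dom_parse_look_result result → Spec_parse_look_result result (parse_look_result result)

-- ===== LEMMAS AND PROOFS =====

-- the per-field transformation B applies: strip then whitespace-split
def pvG (f : List Char) : List String :=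
  (PySem.Chars.split₀ (PySem.Chars.strip f)).map String.mk

-- reference recursion computing what PySem.Chars.splitOn.go computes (fields of a split on ',')
def pvF : List Char → List Char → List (List Char)
  | [], cur => [cur.reverse]
  | c :: rest, cur => if c = ',' then cur.reverse :: pvF rest [] else pvF rest (c :: cur)

theorem pvGo_spec : ∀ (fuel : Nat) (l cur : List Char) (acc : List (List Char)),
    l.length < fuel →
    PySem.Chars.splitOn.go [','] fuel l cur acc = acc.reverse ++ pvF l cur := by
  intro fuel
  induction fuel with
  | zero => intro l cur acc hl; omega
  | succ n ih =>
    intro l cur acc hl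
    cases l with
    | nil => simp [PySem.Chars.splitOn.go, pvF]
    | cons c rest =>
      by_cases hc : c = ','
      · subst hc
        simp [PySem.Chars.splitOn.go, List.isPrefixOf, pvF,
          ih rest [] _ (by simpa using hl)]
      · simp [PySem.Chars.splitOn.go, List.isPrefixOf, hc, pvF,
          ih rest (c :: cur) acc (by simp at hl ⊢; omega)]
        exact fun h => absurd h.symm hc

theorem pvSplitOn_eq_pvF (cs : List Char) : PySem.Chars.splitOn cs [','] = pvF cs [] := by
  have := pvGo_spec (cs.length + 1) cs [] [] (by omega)
  simpa [PySem.Chars.splitOn] using this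

theorem pvF_ne_nil : ∀ (cs cur : List Char), pvF cs cur ≠ [] := by
  intro cs
  induction cs with
  | nil => intro cur; simp [pvF]
  | cons c rest ih => intro cur; by_cases hc : c = ',' <;> simp [pvF, hc, ih]

theorem pvF_modifyHead : ∀ (cs cur : List Char),
    pvF cs cur = (pvF cs []).modifyHead (cur.reverse ++ ·) := by
  intro cs
  induction cs with
  | nil => intro cur; simp [pvF]
  | cons c rest ih =>
    intro cur
    by_cases hc : c = ','
    · simp [pvF, hc]
    · calc pvF (c :: rest) cur = pvF rest (c :: cur) := by simp [pvF, hc]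
        _ = (pvF rest []).modifyHead ((c :: cur).reverse ++ ·) := ih (c :: cur)
        _ = ((pvF rest []).modifyHead ([c] ++ ·)).modifyHead (cur.reverse ++ ·) := by
              rw [List.modifyHead_modifyHead]
              simp [Function.comp_def]
        _ = (pvF (c :: rest) []).modifyHead (cur.reverse ++ ·) := by
              rw [show pvF (c :: rest) [] = pvF rest [c] by simp [pvF, hc],
                  ih [c]]
              simp

theorem pvF_append (pre : List Char) : ∀ (rem : List Char), (',' ∉ pre) →
    pvF (pre ++ rem) [] = (pvF rem []).modifyHead (pre ++ ·) := by
  induction pre with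
  | nil =>
    intro rem _
    rw [List.nil_append]
    cases h : pvF rem [] <;> simp [h]
  | cons c pre' ih =>
    intro rem hp
    have hc : c ≠ ',' := fun h => hp (h ▸ List.mem_cons_self)
    have hp' : ',' ∉ pre' := fun h => hp (List.mem_cons_of_mem _ h)
    calc pvF ((c :: pre') ++ rem) [] = pvF (pre' ++ rem) [c] := by simp [pvF, hc]
      _ = (pvF (pre' ++ rem) []).modifyHead ([c] ++ ·) := by rw [pvF_modifyHead]; simp
      _ = ((pvF rem []).modifyHead (pre' ++ ·)).modifyHead ([c] ++ ·) := by rw [ih rem hp']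
      _ = (pvF rem []).modifyHead ((c :: pre') ++ ·) := by
            rw [List.modifyHead_modifyHead]; simp [Function.comp_def]

-- reference recursion for A's loop, expressed on the remaining suffix of content
def pvM : List Char → List String → List (List String)
  | [], cur => [cur]
  | c :: rest, cur =>
    if c = ',' then cur :: pvM rest []
    else
      let t := (c :: rest).takeWhile (fun x => !(x == ','))
      let tc := PySem.Chars.strip t
      pvM ((c :: rest).dropWhile (fun x => !(x == ',')))
        (if tc ≠ [] then (PySem.Chars.split₀ tc).map String.mk else [])
  termination_by cs _ => cs.length
  decreasing_by
    · simp
    · have hpc : (fun x => !(x == ',')) c = true := by simpa using (by assumption : ¬ c = ',')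
      have h2 : (List.dropWhile (fun x => !(x == ',')) (c :: rest)).length ≤ rest.length := by
        simp only [List.dropWhile_cons]
        rw [if_pos hpc]
        exact List.length_dropWhile_le _ _
      simp only [List.length_cons]
      omega

theorem pvG_nil : pvG [] = [] := rfl

theorem pvG_if (t : List Char) :
    (if PySem.Chars.strip t ≠ [] then (PySem.Chars.split₀ (PySem.Chars.strip t)).map String.mk else [])
    = pvG t := by
  by_cases h : PySem.Chars.strip t = []
  · simp [pvG, h]
    rfl
  · simp [pvG, h]

theorem pvStrip_cons_space (x : List Char) :
    PySem.Chars.strip (' ' :: x) = PySem.Chars.strip x := by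
  simp [PySem.Chars.strip, PySem.Chars.lstrip, List.dropWhile_cons]
  rfl

theorem pvM_skip (r : List Char) : pvM (' ' :: r) [] = pvM r [] := by
  have h1 : PySem.Chars.strip [' '] = [] := rfl
  cases r with
  | nil => simp [pvM, h1]
  | cons c' r' =>
    by_cases hc : c' = ','
    · subst hc
      rw [pvM]
      simp [List.takeWhile_cons, List.dropWhile_cons, h1]
    · rw [pvM, pvM]
      simp only [List.takeWhile_cons, List.dropWhile_cons]
      simp [hc, pvStrip_cons_space]

theorem pvM_spec : ∀ (n : Nat) (cs : List Char) (cur : List String) (f : List Char) (fs : List (List Char)),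
    cs.length ≤ n → pvF cs [] = f :: fs →
    pvM cs cur = (if f = [] then cur else pvG f) :: fs.map pvG := by
  intro n
  induction n with
  | zero =>
    intro cs cur f fs hn hf
    have : cs = [] := List.length_eq_zero_iff.mp (Nat.le_zero.mp hn)
    subst this
    rw [pvF] at hf
    simp at hf
    obtain ⟨h1, h2⟩ := hf
    subst h1; subst h2
    rw [pvM]
    simp
  | succ n ih =>
    intro cs cur f fs hn hf
    cases cs with
    | nil =>
      rw [pvF] at hf
      simp at hf
      obtain ⟨h1, h2⟩ := hf
      subst h1; subst h2
      rw [pvM]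
      simp
    | cons c rest =>
      by_cases hc : c = ','
      · subst hc
        have hF : pvF (',' :: rest) [] = [] :: pvF rest [] := by rw [pvF]; simp
        rw [hF, List.cons.injEq] at hf
        obtain ⟨hf1, hf2⟩ := hf
        obtain ⟨f', fs', hrest⟩ := List.exists_cons_of_ne_nil (pvF_ne_nil rest [])
        have hrec := ih rest [] f' fs' (by simp at hn; omega) hrest
        have hmap : pvM rest [] = (pvF rest []).map pvG := by
          rw [hrec, hrest]
          by_cases hf' : f' = [] <;> simp [hf', pvG_nil]
        rw [pvM]
        simp [hmap, ← hf1, ← hf2]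
      · -- non-comma head: the field is the comma-free prefix of the suffix
        have hpc : (fun x => !(x == ',')) c = true := by simpa using hc
        set p : Char → Bool := fun x => !(x == ',') with hp
        have hsplit : (c :: rest).takeWhile p ++ (c :: rest).dropWhile p = c :: rest :=
          List.takeWhile_append_dropWhile
        have hnc : ',' ∉ (c :: rest).takeWhile p := by
          intro hmem
          have := List.mem_takeWhile_imp hmem
          simp [hp] at this
        have htne : (c :: rest).takeWhile p ≠ [] := by
          simp [List.takeWhile_cons, hpc]
        rw [pvM]
        simp only [if_neg hc]
        rw [pvG_if]
        rcases hd : (c :: rest).dropWhile p with _ | ⟨d, r'⟩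
        · -- no comma at all: a single field
          have hF2 : pvF (c :: rest) [] = [(c :: rest).takeWhile p] := by
            conv_lhs => rw [← hsplit]
            rw [pvF_append _ _ hnc, hd]
            simp [pvF]
          rw [hF2] at hf
          simp only [List.cons.injEq] at hf
          obtain ⟨hf1, hf2⟩ := hf
          subst hf2
          rw [pvM]
          simp [← hf1, htne]
          rw [← hp]
        · have hdc : d = ',' := by
            have hne : (c :: rest).dropWhile p ≠ [] := by rw [hd]; simp
            have h5 := List.head_dropWhile_not p (l := c :: rest) hne
            have hh : ((c :: rest).dropWhile p).head hne = d := by simp only [hd, List.head_cons]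
            rw [hh] at h5
            simpa [hp] using h5
          subst hdc
          have hF3 : pvF (c :: rest) [] = (c :: rest).takeWhile p :: pvF r' [] := by
            conv_lhs => rw [← hsplit]
            rw [pvF_append _ _ hnc, hd, pvF]
            simp
          rw [hF3] at hf
          simp only [List.cons.injEq] at hf
          obtain ⟨hf1, hf2⟩ := hf
          obtain ⟨f', fs', hr'⟩ := List.exists_cons_of_ne_nil (pvF_ne_nil r' [])
          have hlen : r'.length ≤ n := by
            have h1 := List.length_dropWhile_le p (c :: rest)
            rw [hd] at h1
            simp at h1 hn
            omega
          have hrec := ih r' [] f' fs' hlen hr'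
          have hmap : pvM r' [] = (pvF r' []).map pvG := by
            rw [hrec, hr']
            by_cases hf' : f' = [] <;> simp [hf', pvG_nil]
          rw [pvM]
          simp [hmap, ← hf1, ← hf2, htne]
          rw [← hp]

theorem pvM_map (cs : List Char) : pvM cs [] = (pvF cs []).map pvG := by
  obtain ⟨f, fs, hf⟩ := List.exists_cons_of_ne_nil (pvF_ne_nil cs [])
  rw [pvM_spec cs.length cs [] f fs (Nat.le_refl _) hf, hf]
  by_cases h : f = [] <;> simp [h, pvG_nil]

-- characterization of the inner comma scan
theorem pvFindEnd_spec : ∀ (content : List Char) (i : Nat),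
    pvFindEnd content i = i + ((content.drop i).takeWhile (fun x => !(x == ','))).length := by
  intro content i
  fun_induction pvFindEnd content i with
  | case1 e h hc =>
    rw [List.drop_eq_getElem_cons h]
    simp [List.takeWhile_cons, hc]
  | case2 e h hc ih =>
    rw [List.drop_eq_getElem_cons h]
    have hpc : (fun x => !(x == ',')) content[e] = true := by simpa using hc
    rw [List.takeWhile_cons_of_pos (p := fun x => !(x == ',')) (l := content.drop (e + 1)) hpc]
    simp [ih]
    omega
  | case3 e h =>
    rw [List.drop_eq_nil_of_le (by omega)]
    simp

theorem pvDropWhile_eq_drop (p : Char → Bool) (l : List Char) :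
    l.dropWhile p = l.drop (l.takeWhile p).length := by
  induction l with
  | nil => simp
  | cons c r ih => by_cases h : p c <;> simp [List.dropWhile_cons, h, ih]

theorem pvLoop_spec (content : List Char) : ∀ (d i : Nat) (tiles : List (List String)) (cur : List String),
    content.length - i ≤ d → i ≤ content.length →
    pvLoopA content i tiles cur = tiles ++ pvM (content.drop i) cur := by
  intro d
  induction d with
  | zero =>
    intro i tiles cur hd hi
    have : i = content.length := by omega
    subst this
    rw [pvLoopA, List.drop_eq_nil_of_le (Nat.le_refl _), pvM]
    simp
  | succ n ih =>
    intro i tiles cur hd hi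
    by_cases h : i < content.length
    · by_cases hc : content[i] = ','
      · -- comma branch
        rw [pvLoopA]
        simp only [dif_pos h, if_pos hc]
        rw [List.drop_eq_getElem_cons h, hc, pvM]
        simp only [if_pos rfl]
        by_cases h2 : i + 1 < content.length
        · by_cases hsp : content[i + 1] = ' '
          · simp only [dif_pos h2, if_pos hsp]
            rw [ih (i + 2) (tiles ++ [cur]) [] (by omega) (by omega)]
            rw [List.drop_eq_getElem_cons h2, hsp, pvM_skip]
            simp
          · simp only [dif_pos h2, if_neg hsp]
            rw [ih (i + 1) (tiles ++ [cur]) [] (by omega) (by omega)]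
            simp
        · simp only [dif_neg h2]
          rw [ih (i + 1) (tiles ++ [cur]) [] (by omega) (by omega)]
          simp
      · -- field branch
        have hpc : (fun x => !(x == ',')) content[i] = true := by simpa using hc
        set p : Char → Bool := fun x => !(x == ',') with hp
        set t := (content.drop i).takeWhile p with ht
        have he : pvFindEnd content i = i + t.length := pvFindEnd_spec content i
        have htlen : t.length ≤ (content.drop i).length := by
          rw [ht]
          exact (List.takeWhile_prefix p).length_le
        have hslice : PySem.List.slice content (some (i : Int)) (some ((pvFindEnd content i) : Int))
            = t := by
          rw [he, PySem.List.slice_natCast]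
          have h3 : i + t.length - i = t.length := by omega
          rw [h3]
          exact (List.prefix_iff_eq_take.mp (List.takeWhile_prefix p)).symm
        have hdropeq : content.drop (pvFindEnd content i) = (content.drop i).dropWhile p := by
          rw [he, ← List.drop_drop, pvDropWhile_eq_drop]
        rw [pvLoopA]
        simp only [dif_pos h, if_neg hc]
        rw [ih (pvFindEnd content i) tiles _ (by have := pvFindEnd_gt content i h hc; omega)
              (by rw [he]; simp at htlen; omega)]
        rw [hslice, hdropeq]
        conv_rhs => rw [List.drop_eq_getElem_cons h, pvM]
        simp only [if_neg hc]
        rw [← List.drop_eq_getElem_cons h]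
    · have : i = content.length := by omega
      subst this
      rw [pvLoopA, List.drop_eq_nil_of_le (Nat.le_refl _), pvM]
      simp

-- ===== VERDICT (by name: the statement is the Claim_ definition above) =====
theorem parse_look_result_spec : Claim_equal_parse_look_result := by
  intro result _
  unfold Spec_parse_look_result parse_look_result parse_look_result_alt
  set content := PySem.Chars.stripChars result.toList "[]".toList
  rw [pvLoop_spec content content.length 0 [] [] (by omega) (by omega)]
  rw [List.drop_zero, pvM_map, pvSplitOn_eq_pvF]
  rfl
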